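-- pv_equiv track=rewrite | github.com/zeeshan4002911/DSA-reloaded | 1.data-structure/4.matrix/easy/unique-in-a-matrix.py | unique_in_a_matrix
-- ===== SOURCE A (Python) =====
-- def unique_in_a_matrix(mat):
--     hash_map = {}
--     for row in mat:
--         for ele in row:
--             if ele not in hash_map:
--                 hash_map[ele] = 1
--             else:
--                 hash_map[ele] += 1
--
--     result = []
--     for key, value in hash_map.items():
--         # Only unique element having one occurence
--         if value == 1:
--             result.append(key)
--
--     return result
-- ===== SOURCE B (Python) =====
-- def unique_in_a_matrix(mat):
--     seen = set()
--     duplicates = set()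
--     for row in mat:
--         for ele in row:
--             if ele in seen:
--                 duplicates.add(ele)
--             else:
--                 seen.add(ele)
--     uniques = seen - duplicates
--     result = []
--     for row in mat:
--         for ele in row:
--             if ele in uniques:
--                 result.append(ele)
--     return result
-- ===== Notes on version B (the rewrite author's own statement) =====
-- stated objective: alternative
-- what changed: Replaces the occurrence-counting dict and the dict-items scan by two membership sets (seen/duplicates) built in one pass, a set difference, and a second pass over the matrix that emits the elements of seen-duplicates in order; no counts are ever maintained.
import Mathlib
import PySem

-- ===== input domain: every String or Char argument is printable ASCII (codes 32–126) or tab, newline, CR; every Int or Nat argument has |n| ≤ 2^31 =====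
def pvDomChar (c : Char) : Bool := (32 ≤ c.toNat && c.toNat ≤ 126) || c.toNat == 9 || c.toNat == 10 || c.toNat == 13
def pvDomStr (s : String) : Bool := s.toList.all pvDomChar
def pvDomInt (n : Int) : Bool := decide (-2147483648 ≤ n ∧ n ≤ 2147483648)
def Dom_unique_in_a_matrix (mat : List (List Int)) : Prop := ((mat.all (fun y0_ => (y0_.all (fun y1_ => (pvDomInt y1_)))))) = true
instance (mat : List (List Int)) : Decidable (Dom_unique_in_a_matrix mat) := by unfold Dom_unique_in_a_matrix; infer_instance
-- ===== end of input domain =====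

-- B replaces A's occurrence-counting dict (scanned via items()) by two membership sets
-- (seen/duplicates), a set difference, and a second pass over the matrix; same return value.

-- ===== PORT A =====
def unique_in_a_matrix (mat : List (List Int)) : List Int :=
  let hash_map : PySem.Dict Int Int :=
    mat.foldl (fun hm row =>
      row.foldl (fun hm ele =>
        if hm.contains ele = false then hm.insert ele 1
        else hm.modify ele 0 (· + 1)) hm) PySem.Dict.empty
  hash_map.items.foldl (fun result kv =>
    if kv.2 == 1 then result ++ [kv.1] else result) []

-- ===== PORT B =====
def unique_in_a_matrix_alt (mat : List (List Int)) : List Int :=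
  let sd : PySem.Set Int × PySem.Set Int :=
    mat.foldl (fun sd row =>
      row.foldl (fun (sd : PySem.Set Int × PySem.Set Int) ele =>
        if PySem.Set.contains sd.1 ele then (sd.1, PySem.Set.add sd.2 ele)
        else (PySem.Set.add sd.1 ele, sd.2)) sd) (PySem.Set.empty, PySem.Set.empty)
  let uniques : PySem.Set Int := PySem.Set.diff sd.1 sd.2
  mat.foldl (fun result row =>
    row.foldl (fun result ele =>
      if PySem.Set.contains uniques ele then result ++ [ele] else result) result) []

-- ===== PRECONDITION & SPEC =====
def Spec_unique_in_a_matrix (mat : List (List Int)) (out : List Int) : Prop := out = unique_in_a_matrix_alt mat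
instance (mat : List (List Int)) (out : List Int) : Decidable (Spec_unique_in_a_matrix mat out) := by unfold Spec_unique_in_a_matrix; infer_instance

-- ===== CLAIM (what is proved, stated in full; the proofs are below) =====
def Claim_equal_unique_in_a_matrix : Prop := ∀ (mat : List (List Int)), Dom_unique_in_a_matrix mat → Spec_unique_in_a_matrix mat (unique_in_a_matrix mat)

-- ===== LEMMAS AND PROOFS =====

def pvStepA (hm : PySem.Dict Int Int) (ele : Int) : PySem.Dict Int Int :=
  if hm.contains ele = false then hm.insert ele 1 else hm.modify ele 0 (· + 1)

def pvStepB (sd : PySem.Set Int × PySem.Set Int) (ele : Int) : PySem.Set Int × PySem.Set Int :=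
  if PySem.Set.contains sd.1 ele then (sd.1, PySem.Set.add sd.2 ele)
  else (PySem.Set.add sd.1 ele, sd.2)

theorem pvStepA_eq_counter_step (d : PySem.Dict Int Int) (x : Int) :
    pvStepA d x = d.modify x 0 (· + 1) := by
  unfold pvStepA
  by_cases h : d.contains x = false
  · simp [h, PySem.Dict.modify, PySem.Dict.getD_of_not_contains d 0 h]
  · simp [h]

theorem pv_dictA (xs : List Int) :
    xs.foldl pvStepA PySem.Dict.empty = PySem.Dict.counter xs := by
  rw [PySem.Dict.counter_eq_foldl]
  exact PySem.List.foldl_congr_mem _ _ _ _ (fun a x _ => pvStepA_eq_counter_step a x)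

theorem pvStepB_pos (s d : PySem.Set Int) (x : Int) (h : PySem.Set.contains s x = true) :
    pvStepB (s, d) x = (s, PySem.Set.add d x) := by
  simp only [pvStepB]; rw [if_pos h]

theorem pvStepB_neg (s d : PySem.Set Int) (x : Int) (h : PySem.Set.contains s x = false) :
    pvStepB (s, d) x = (PySem.Set.add s x, d) := by
  simp only [pvStepB]; rw [if_neg (by rw [h]; simp)]

theorem pvB_fst (xs : List Int) (s d : PySem.Set Int) :
    (xs.foldl pvStepB (s, d)).1 = PySem.Set.update s xs := by
  induction xs generalizing s d with
  | nil => rfl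
  | cons x xs ih =>
      rw [List.foldl_cons, PySem.Set.update_cons]
      by_cases h : PySem.Set.contains s x = true
      · rw [pvStepB_pos _ _ _ h, ih, PySem.Set.add_of_mem ((PySem.Set.contains_iff _ _).mp h)]
      · rw [pvStepB_neg _ _ _ (by simpa using h), ih]

theorem pvB_snd (xs : List Int) (s d : PySem.Set Int) (x : Int) :
    x ∈ (xs.foldl pvStepB (s, d)).2 ↔
      x ∈ d ∨ (x ∈ s ∧ 1 ≤ xs.count x) ∨ 2 ≤ xs.count x := by
  induction xs generalizing s d with
  | nil => simp
  | cons y ys ih =>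
      rw [List.foldl_cons]
      by_cases h : PySem.Set.contains s y = true
      · have hy : y ∈ s := (PySem.Set.contains_iff _ _).mp h
        rw [pvStepB_pos _ _ _ h, ih]
        by_cases hxy : x = y
        · subst hxy
          have h1 : 1 ≤ List.count x ys + 1 := by omega
          simp [PySem.Set.mem_add, List.count_cons_self, hy, h1]
        · simp [PySem.Set.mem_add, hxy, List.count_cons_of_ne (Ne.symm hxy)]
      · have hy : y ∉ s := fun hm => h ((PySem.Set.contains_iff _ _).mpr hm)
        rw [pvStepB_neg _ _ _ (by simpa using h), ih]
        by_cases hxy : x = y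
        · subst hxy
          simp only [PySem.Set.mem_add, List.count_cons_self, hy, false_and, false_or, or_true,
            true_and]
          constructor
          · rintro (hd | hc | hc)
            · exact Or.inl hd
            · exact Or.inr (by omega)
            · exact Or.inr (by omega)
          · rintro (hd | hc)
            · exact Or.inl hd
            · exact Or.inr (Or.inl (by omega))
        · simp [PySem.Set.mem_add, hxy, List.count_cons_of_ne (Ne.symm hxy)]

theorem pv_foldl_rows {α : Type} (g : α → Int → α) (mat : List (List Int)) (init : α) :
    mat.foldl (fun a row => row.foldl g a) init = mat.flatten.foldl g init := by
  induction mat generalizing init with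
  | nil => rfl
  | cons r rs ih => simp [List.flatten, List.foldl_append, ih]

theorem pv_filter_foldl_add (p : Int → Bool) (xs : List Int) (s : List Int)
    (hp : ∀ e, p e = true → s.count e + xs.count e ≤ 1) :
    (xs.foldl PySem.Set.add s).filter p = s.filter p ++ xs.filter p := by
  induction xs generalizing s with
  | nil => simp
  | cons x xs ih =>
      by_cases hx : x ∈ s
      · have hpx : p x = false := by
          by_contra hc
          have h0 := hp x (by simpa using hc)
          have h1 : 1 ≤ s.count x := List.one_le_count_iff.mpr hx
          simp [List.count_cons_self] at h0
          omega
        rw [List.foldl_cons, PySem.Set.add_of_mem hx, ih, List.filter_cons, hpx]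
        · simp
        · intro e he
          have h0 := hp e he
          have : xs.count e ≤ (x :: xs).count e := by
            rw [List.count_cons]; omega
          omega
      · rw [List.foldl_cons, PySem.Set.add_of_not_mem hx, ih, List.filter_append,
          List.filter_cons]
        · cases hpe : p x
          · simp [hpe]
          · simp [hpe]
        · intro e he
          have h0 := hp e he
          rw [List.count_cons] at h0
          rw [List.count_append]
          simp only [List.count_cons, List.count_nil]
          omega

theorem pv_filter_ofList (p : Int → Bool) (xs : List Int)
    (hp : ∀ e, p e = true → xs.count e ≤ 1) :
    (PySem.Set.ofList xs).filter p = xs.filter p := by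
  rw [PySem.Set.ofList_eq_foldl, pv_filter_foldl_add p xs []]
  · simp
  · intro e he; simpa using hp e he

theorem pvA_norm (mat : List (List Int)) :
    unique_in_a_matrix mat
      = (mat.flatten).filter (fun e => mat.flatten.count e == 1) := by
  unfold unique_in_a_matrix
  simp only [show (fun (hm : PySem.Dict Int Int) (ele : Int) =>
        if hm.contains ele = false then hm.insert ele 1
        else hm.modify ele 0 (· + 1)) = pvStepA from rfl,
    pv_foldl_rows, pv_dictA,
    PySem.List.foldl_append_if (fun kv : Int × Int => kv.2 == 1) (fun kv : Int × Int => kv.1),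
    PySem.Dict.items_counter, List.filter_map, List.map_map, Function.comp_def,
    List.nil_append]
  rw [show (fun k : Int => ((k, (mat.flatten.count k : Int)).2 == 1)) = (fun k : Int => mat.flatten.count k == 1) from by
      funext k; simp]
  rw [pv_filter_ofList]
  · simp
  · intro e he
    simp at he
    omega

theorem pvB_norm (mat : List (List Int)) :
    unique_in_a_matrix_alt mat
      = (mat.flatten).filter (fun e => mat.flatten.count e == 1) := by
  unfold unique_in_a_matrix_alt
  rw [show (fun (sd : PySem.Set Int × PySem.Set Int) (ele : Int) =>
        if PySem.Set.contains sd.1 ele then (sd.1, PySem.Set.add sd.2 ele)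
        else (PySem.Set.add sd.1 ele, sd.2)) = pvStepB from rfl]
  rw [pv_foldl_rows pvStepB, pv_foldl_rows, PySem.List.foldl_append_if_eq_filter]
  simp only [List.nil_append]
  apply List.filter_congr
  intro e he
  have h1 : 1 ≤ mat.flatten.count e := List.one_le_count_iff.mpr he
  have hmem : e ∈ PySem.Set.diff (mat.flatten.foldl pvStepB (PySem.Set.empty, PySem.Set.empty)).1
      (mat.flatten.foldl pvStepB (PySem.Set.empty, PySem.Set.empty)).2 ↔
      mat.flatten.count e = 1 := by
    rw [PySem.Set.mem_diff, pvB_fst, pvB_snd, PySem.Set.update_empty, PySem.Set.mem_ofList]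
    constructor
    · rintro ⟨_, hnd⟩
      simp only [PySem.Set.empty, List.not_mem_nil, false_or, false_and] at hnd
      omega
    · intro hc
      refine ⟨he, ?_⟩
      simp only [PySem.Set.empty, List.not_mem_nil, false_or, false_and]
      omega
  by_cases hb : PySem.Set.contains (PySem.Set.diff (mat.flatten.foldl pvStepB (PySem.Set.empty, PySem.Set.empty)).1
      (mat.flatten.foldl pvStepB (PySem.Set.empty, PySem.Set.empty)).2) e = true
  · have hc := hmem.mp ((PySem.Set.contains_iff _ _).mp hb)
    rw [hb]
    simp [hc]
  · have hne : mat.flatten.count e ≠ 1 := fun hc =>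
      hb ((PySem.Set.contains_iff _ _).mpr (hmem.mpr hc))
    rw [Bool.eq_false_iff.mpr hb]
    simp [hne]

-- ===== VERDICT (by name: the statement is the Claim_ definition above) =====
theorem unique_in_a_matrix_spec : Claim_equal_unique_in_a_matrix := by
  intro mat _
  unfold Spec_unique_in_a_matrix
  rw [pvA_norm, pvB_norm]
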